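-- pv_equiv track=rewrite | github.com/PytonStrangler93/PYReposit | Test/Codewars solutions/Codewars 6/6.31 decode str 50%.py | encrypt1
-- ===== SOURCE A (Python) =====
-- def encrypt1(text, n):
--     if text == '' or n <= 0 or text == None:
--         return text
--     else:
--         odd = ''.join([text[i] for i in range(0, len(text)) if i % 2 != 0])
--         even = ''.join([text[i] for i in range(0, len(text)) if i % 2 == 0])
--         if n > 0:
--             return encrypt(odd+even, n-1)
--         else:
--             return odd+even
--
-- def encrypt(text, n):
--     for i in range(n):
--         text = text[1::2] + text[::2]
--     return text
-- ===== SOURCE B (Python) =====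
-- def encrypt1(text, n):
--     if text == '' or n <= 0 or text == None:
--         return text
--     step = lambda s: s[1::2] + s[::2]
--     s = step(text)
--     t = 1
--     while t < n and s != text:
--         s = step(s)
--         t += 1
--     if s != text:
--         return s
--     # the orbit returned to the original after t steps, so n applications give the same string as n % t
--     r = text
--     for _ in range(n % t):
--         r = step(r)
--     return r
-- ===== Notes on version B (the rewrite author's own statement) =====
-- stated objective: alternative
-- what changed: B detects the period of the odd/even shuffle on this string (the orbit returns to its start, since the shuffle permutes positions) and applies only n mod period shuffles, instead of A's unconditional n applications.
import Mathlib
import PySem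

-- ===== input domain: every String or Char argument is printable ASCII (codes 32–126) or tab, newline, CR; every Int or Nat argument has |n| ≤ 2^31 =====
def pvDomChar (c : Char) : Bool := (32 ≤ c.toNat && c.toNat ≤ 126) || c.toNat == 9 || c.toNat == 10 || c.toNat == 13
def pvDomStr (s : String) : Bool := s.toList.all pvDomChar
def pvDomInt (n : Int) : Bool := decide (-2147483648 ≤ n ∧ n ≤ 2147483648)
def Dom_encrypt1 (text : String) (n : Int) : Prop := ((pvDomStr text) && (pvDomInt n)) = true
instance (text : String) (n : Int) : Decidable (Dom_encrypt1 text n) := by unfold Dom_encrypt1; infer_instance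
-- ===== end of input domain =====

-- B finds the period of the odd/even shuffle on this string by iterating it until the string
-- returns to its start, then applies only n mod period shuffles; A applies all n unconditionally.
-- Same return value (a different algorithm; cost depends on the period, not claimed faster).

-- ===== PORT A =====
-- the shuffle 's[1::2] + s[::2]' on the character list (step 2 ≠ 0, so slice? is always some;
-- .getD [] is never the default)
def pyStep (s : List Char) : List Char :=
  (PySem.Chars.slice? s (some 1) none 2).getD [] ++ (PySem.Chars.slice? s none none 2).getD []

-- helper 'encrypt': for i in range(n): text = text[1::2] + text[::2]
def encryptA (t : List Char) (n : Int) : List Char :=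
  (PySem.List.pyRange 0 n 1).foldl (fun t _ => pyStep t) t

def encrypt1 (text : String) (n : Int) : String :=
  -- 'text == None' can never hold for a String argument and is dropped
  if text = "" ∨ n ≤ 0 then text
  else
    let cs := text.toList
    let odd := ((PySem.List.pyRange 0 (cs.length : Int) 1).filter
        (fun i => ¬ PySem.Int.mod i 2 = 0)).filterMap (fun i => PySem.List.pyGet? cs i)
    let even := ((PySem.List.pyRange 0 (cs.length : Int) 1).filter
        (fun i => PySem.Int.mod i 2 = 0)).filterMap (fun i => PySem.List.pyGet? cs i)
    String.ofList (encryptA (odd ++ even) (n - 1))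

-- ===== PORT B =====
-- the while loop: while t < n and s != text: s = step(s); t += 1   (fuel = n - t)
def altLoop (orig : List Char) (s : List Char) (t : Nat) : Nat → List Char × Nat
  | 0 => (s, t)
  | fuel + 1 => if s = orig then (s, t) else altLoop orig (pyStep s) (t + 1) fuel

def encrypt1_alt (text : String) (n : Int) : String :=
  if text = "" ∨ n ≤ 0 then text
  else
    let cs := text.toList
    let r := altLoop cs (pyStep cs) 1 (n.toNat - 1)
    if r.1 ≠ cs then String.ofList r.1
    else String.ofList ((PySem.List.pyRange 0 (PySem.Int.mod n (r.2 : Int)) 1).foldl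
        (fun t _ => pyStep t) cs)

-- ===== PRECONDITION & SPEC =====
def Spec_encrypt1 (text : String) (n : Int) (out : String) : Prop := out = encrypt1_alt text n
instance (text : String) (n : Int) (out : String) : Decidable (Spec_encrypt1 text n out) := by unfold Spec_encrypt1; infer_instance

-- ===== CLAIM (what is proved, stated in full; the proofs are below) =====
def Claim_equal_encrypt1 : Prop := ∀ (text : String) (n : Int), Dom_encrypt1 text n → Spec_encrypt1 text n (encrypt1 text n)

-- ===== LEMMAS AND PROOFS =====

-- elements at even / odd positions
def evensL {α : Type} : List α → List α
  | [] => []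
  | [a] => [a]
  | a :: _ :: t => a :: evensL t

def oddsL {α : Type} : List α → List α
  | [] => []
  | [_] => []
  | _ :: b :: t => b :: oddsL t

theorem aux_even {α : Type} (a b : α) (t : List α) :
    PySem.List.slice? (a::b::t) none none 2 = (PySem.List.slice? t none none 2).map (a :: ·) := by
  simp only [PySem.List.slice?, PySem.List.sliceIndices]
  norm_num
  rw [if_pos (show (0:Int) ≤ ↑t.length + 1 by positivity)]
  have hc1 : (((t.length : Int) + 1 + 1 + 2 - 1) / 2).toNat = (t.length+1)/2 + 1 := by omega
  have hc0 : (if 0 < t.length then (((t.length : Int) + 2 - 1) / 2).toNat else 0) = (t.length+1)/2 := by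
    split <;> omega
  rw [hc1, hc0, List.range_succ_eq_map, List.filterMap_cons, List.filterMap_map]
  norm_num
  apply List.filterMap_congr
  intro x hx
  rw [show ((2 : Int) * (↑x + 1)).toNat = 2*x + 2 by omega,
      show ((2 : Int) * ↑x).toNat = 2*x by omega]
  rw [show 2*x + 2 = (2*x+1)+1 from rfl, List.getElem?_cons_succ, List.getElem?_cons_succ]

theorem aux_odd {α : Type} (a b : α) (t : List α) :
    PySem.List.slice? (a::b::t) (some 1) none 2 = (PySem.List.slice? t (some 1) none 2).map (b :: ·) := by
  cases t with
  | nil => simp [PySem.List.slice?, PySem.List.sliceIndices]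
  | cons c t =>
    simp only [PySem.List.slice?, PySem.List.sliceIndices]
    norm_num
    rw [show min 1 ((t.length : Int) + 1 + 1 + 1) = 1 by omega]
    rw [if_pos (show (0:Int) ≤ ↑t.length + 1 by positivity)]
    have hc1 : (((t.length : Int) + 1 + 1 + 1 - 1 + 2 - 1) / 2).toNat = (t.length+1)/2 + 1 := by omega
    have hc0 : (if 0 < t.length then (((t.length : Int) + 2 - 1) / 2).toNat else 0) = (t.length+1)/2 := by
      split <;> omega
    rw [hc1, hc0, List.range_succ_eq_map, List.filterMap_cons, List.filterMap_map]
    norm_num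
    apply List.filterMap_congr
    intro x hx
    rw [show ((1:Int) + 2 * (↑x + 1)).toNat = 2*x + 3 by omega,
        show ((1:Int) + 2 * ↑x).toNat = 2*x + 1 by omega]
    rfl

theorem slice2_evens {α : Type} (l : List α) :
    PySem.List.slice? l none none 2 = some (evensL l) := by
  induction l using evensL.induct with
  | case1 => rfl
  | case2 a => simp [PySem.List.slice?, PySem.List.sliceIndices, evensL]
  | case3 a b t ih => rw [aux_even, ih]; rfl

theorem slice2_odds {α : Type} (l : List α) :
    PySem.List.slice? l (some 1) none 2 = some (oddsL l) := by
  induction l using oddsL.induct with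
  | case1 => rfl
  | case2 a => simp [PySem.List.slice?, PySem.List.sliceIndices, oddsL]
  | case3 a b t ih => rw [aux_odd, ih]; rfl

theorem pyStep_eq (l : List Char) : pyStep l = oddsL l ++ evensL l := by
  unfold pyStep
  rw [PySem.Chars.slice?, PySem.Chars.slice?] <;> try rfl
  rw [slice2_evens, slice2_odds]
  rfl

theorem range_add_two (n : Nat) : List.range (n+2) = 0 :: 1 :: (List.range n).map (· + 2) := by
  rw [List.range_succ_eq_map, List.range_succ_eq_map, List.map_cons, List.map_map]
  exact congrArg _ (congrArg _ (List.map_congr_left (fun x _ => by simp [Function.comp])))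

theorem compN_evens {α : Type} (l : List α) :
    ((List.range l.length).filter (fun k => k % 2 == 0)).filterMap (fun k => l[k]?) = evensL l := by
  induction l using evensL.induct with
  | case1 => rfl
  | case2 a => rfl
  | case3 a b t ih =>
    simp only [List.length_cons]
    rw [show t.length + 1 + 1 = t.length + 2 from rfl, range_add_two]
    simp only [List.filter_cons, List.filter_map]
    norm_num
    rw [List.filterMap_cons, List.filterMap_map]
    simp only [Function.comp]
    rw [evensL]
    show _ :: _ = _
    congr 1
    rw [← ih]
    simp only [Function.comp_def]
    rw [List.filter_congr (fun x _ => by simp [Nat.add_mod_right] :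
        ∀ x ∈ List.range t.length, ((x + 2) % 2 == 0) = (x % 2 == 0))]
    apply List.filterMap_congr
    intro x hx
    rw [show x + 2 = (x+1)+1 from rfl, List.getElem?_cons_succ, List.getElem?_cons_succ]

theorem compN_odds {α : Type} (l : List α) :
    ((List.range l.length).filter (fun k => !(k % 2 == 0))).filterMap (fun k => l[k]?) = oddsL l := by
  induction l using oddsL.induct with
  | case1 => rfl
  | case2 a => rfl
  | case3 a b t ih =>
    simp only [List.length_cons]
    rw [show t.length + 1 + 1 = t.length + 2 from rfl, range_add_two]
    simp only [List.filter_cons, List.filter_map]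
    norm_num
    rw [List.filterMap_cons, List.filterMap_map]
    simp only [Function.comp]
    rw [oddsL]
    show _ :: _ = _
    congr 1
    rw [← ih]
    simp only [Function.comp_def]
    rw [List.filter_congr (fun x _ => by simp [Nat.add_mod_right] :
        ∀ x ∈ List.range t.length, (!((x + 2) % 2 == 0)) = (!(x % 2 == 0)))]
    apply List.filterMap_congr
    intro x hx
    rw [show x + 2 = (x+1)+1 from rfl, List.getElem?_cons_succ, List.getElem?_cons_succ]

theorem comp_odds (l : List Char) :
    ((PySem.List.pyRange 0 (l.length : Int) 1).filter
        (fun i => ¬ PySem.Int.mod i 2 = 0)).filterMap (fun i => PySem.List.pyGet? l i) = oddsL l := by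
  rw [PySem.List.pyRange_one]
  norm_num
  rw [List.filter_map, List.filterMap_map]
  rw [show ((fun i => PySem.List.pyGet? l i) ∘ fun k : Nat => ((k : Nat) : Int)) = fun k : Nat => l[k]?
      from funext fun k => PySem.List.pyGet?_natCast l k]
  rw [← compN_odds l]
  congr 1
  apply List.filter_congr
  intro x hx
  simp only [Function.comp_def]
  rcases Nat.mod_two_eq_zero_or_one x with h | h <;> simp [h] <;> omega

theorem comp_evens (l : List Char) :
    ((PySem.List.pyRange 0 (l.length : Int) 1).filter
        (fun i => PySem.Int.mod i 2 = 0)).filterMap (fun i => PySem.List.pyGet? l i) = evensL l := by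
  rw [PySem.List.pyRange_one]
  norm_num
  rw [List.filter_map, List.filterMap_map]
  rw [show ((fun i => PySem.List.pyGet? l i) ∘ fun k : Nat => ((k : Nat) : Int)) = fun k : Nat => l[k]?
      from funext fun k => PySem.List.pyGet?_natCast l k]
  rw [← compN_evens l]
  congr 1
  apply List.filter_congr
  intro x hx
  simp only [Function.comp_def]
  rcases Nat.mod_two_eq_zero_or_one x with h | h <;> simp [h] <;> omega

theorem foldl_const_iterate {α β : Type} (f : α → α) (xs : List β) (a : α) :
    xs.foldl (fun t _ => f t) a = f^[xs.length] a := by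
  induction xs generalizing a with
  | nil => rfl
  | cons x xs ih => simp [List.foldl, ih, Function.iterate_succ_apply]

theorem periodic (cs : List Char) (t : Nat) (ht : 0 < t) (h : pyStep^[t] cs = cs) :
    ∀ k, pyStep^[k] cs = pyStep^[k % t] cs := by
  intro k
  induction k using Nat.strong_induction_on with
  | _ k ih =>
    by_cases hk : k < t
    · rw [Nat.mod_eq_of_lt hk]
    · push_neg at hk
      calc pyStep^[k] cs = pyStep^[(k - t) + t] cs := by rw [Nat.sub_add_cancel hk]
        _ = pyStep^[k - t] (pyStep^[t] cs) := Function.iterate_add_apply _ _ _ _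
        _ = pyStep^[(k - t) % t] cs := by rw [h]; exact ih (k - t) (by omega)
        _ = pyStep^[k % t] cs := by rw [← Nat.mod_eq_sub_mod hk]

theorem altLoop_spec (orig : List Char) :
    ∀ (fuel : Nat) (s : List Char) (t : Nat), s = pyStep^[t] orig →
      (altLoop orig s t fuel).1 = pyStep^[(altLoop orig s t fuel).2] orig ∧
      t ≤ (altLoop orig s t fuel).2 ∧
      ((altLoop orig s t fuel).1 ≠ orig → (altLoop orig s t fuel).2 = t + fuel) := by
  intro fuel
  induction fuel with
  | zero =>
    intro s t hs
    exact ⟨hs, le_refl _, fun _ => rfl⟩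
  | succ fuel ih =>
    intro s t hs
    rw [altLoop]
    by_cases hso : s = orig
    · rw [if_pos hso]
      exact ⟨hs, le_refl _, fun hne => absurd hso hne⟩
    · rw [if_neg hso]
      have hs' : pyStep s = pyStep^[t+1] orig := by
        rw [Function.iterate_succ_apply', hs]
      obtain ⟨h1, h2, h3⟩ := ih (pyStep s) (t+1) hs'
      exact ⟨h1, by omega, fun hne => by have := h3 hne; omega⟩

-- ===== VERDICT (by name: the statement is the Claim_ definition above) =====
theorem encrypt1_spec : Claim_equal_encrypt1 := by
  unfold Claim_equal_encrypt1
  intro text n _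
  unfold Spec_encrypt1 encrypt1 encrypt1_alt
  by_cases hg : text = "" ∨ n ≤ 0
  · rw [if_pos hg, if_pos hg]
  · rw [if_neg hg, if_neg hg]
    dsimp only
    push_neg at hg
    obtain ⟨-, hn⟩ := hg
    have hn' : 0 < n := by omega
    set cs := text.toList with hcs
    -- A's value is pyStep iterated n times
    have hA : encryptA
        (((PySem.List.pyRange 0 (cs.length : Int) 1).filter
            (fun i => ¬ PySem.Int.mod i 2 = 0)).filterMap (fun i => PySem.List.pyGet? cs i) ++
         ((PySem.List.pyRange 0 (cs.length : Int) 1).filter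
            (fun i => PySem.Int.mod i 2 = 0)).filterMap (fun i => PySem.List.pyGet? cs i))
        (n - 1) = pyStep^[n.toNat] cs := by
      rw [comp_odds, comp_evens, ← pyStep_eq]
      unfold encryptA
      rw [foldl_const_iterate, PySem.List.pyRange_one, List.length_map, List.length_range,
          ← Function.iterate_succ_apply]
      congr 1
      omega
    rw [hA]
    -- B's side
    obtain ⟨h1, h2, h3⟩ := altLoop_spec cs (n.toNat - 1) (pyStep cs) 1
      (Function.iterate_one pyStep ▸ rfl)
    set r := altLoop cs (pyStep cs) 1 (n.toNat - 1) with hr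
    by_cases hne : r.1 = cs
    · rw [if_neg (by simpa using hne)]
      have hper : pyStep^[r.2] cs = cs := by rw [← h1, hne]
      have hmod : (PySem.Int.mod n (r.2 : Int)).toNat = n.toNat % r.2 := by
        have h := PySem.Int.mod_natCast n.toNat r.2
        rw [show ((n.toNat : Nat) : Int) = n by omega] at h
        rw [h]
        omega
      rw [foldl_const_iterate, PySem.List.pyRange_one, List.length_map, List.length_range]
      rw [show ((PySem.Int.mod n ↑r.2 - 0)).toNat = (PySem.Int.mod n (r.2 : Int)).toNat by norm_num]
      rw [hmod, ← periodic cs r.2 (by omega) hper n.toNat]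
    · rw [if_pos (by simpa using hne)]
      have := h3 hne
      rw [h1, this, show 1 + (n.toNat - 1) = n.toNat by omega]
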